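-- pv_equiv track=rewrite | github.com/sagemath/sage-archive-2023-02-01 | src/sage/modular/modform_hecketriangle/hecke_triangle_group_element.py | cyclic_representative
-- ===== SOURCE A (Python) =====
-- def cyclic_representative(L):
--     r"""
--     Return a unique representative among all cyclic permutations
--     of the given list/tuple.
--
--     INPUT:
--
--     - ``L`` -- A list or tuple.
--
--     OUTPUT:
--
--     The maximal element among all cyclic permutations with respect
--     to lexicographical ordering.
--
--     EXAMPLES::
--
--         sage: from sage.modular.modform_hecketriangle.hecke_triangle_group_element import cyclic_representative
--         sage: cyclic_representative((1,))
--         (1,)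
--         sage: cyclic_representative((2,2))
--         (2, 2)
--         sage: cyclic_representative((1,2,1,2))
--         (2, 1, 2, 1)
--         sage: cyclic_representative((1,2,3,2,3,1))
--         (3, 2, 3, 1, 1, 2)
--     """
--     if not isinstance(L,list):
--         L = list(L)
--     n = len(L)
--     Lmax = L[:]
--     for _ in range(n-1):
--         L.insert(n-1,L.pop(0))
--         if L > Lmax:
--             Lmax = L[:]
--
--     return tuple(Lmax)
-- ===== SOURCE B (Python) =====
-- def cyclic_representative(L):
--     # Candidate filtering: only a rotation that starts at the beginning of a
--     # run of the maximal element can be the lexicographically maximal rotation;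
--     # compare just those rotations, read off a doubled list instead of rotating
--     # in place.  If every element equals the maximum (no run start), every
--     # rotation is equal and rotation 0 serves.
--     L = list(L)
--     if not L:
--         return ()
--     n = len(L)
--     m = max(L)
--     d = L + L
--     starts = [i for i in range(n) if L[i] == m and L[i - 1] != m] or [0]
--     return tuple(max(d[i:i + n] for i in starts))
-- ===== Notes on version B (the rewrite author's own statement) =====
-- stated objective: faster
-- what changed: A rotates the list in place n-1 times and lexicographically compares every rotation against a running maximum; B filters candidate start positions down to the run starts of the maximal element (with position 0 when all elements are equal) and compares only those rotations, read off a doubled list L+L without mutating.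
import Mathlib
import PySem

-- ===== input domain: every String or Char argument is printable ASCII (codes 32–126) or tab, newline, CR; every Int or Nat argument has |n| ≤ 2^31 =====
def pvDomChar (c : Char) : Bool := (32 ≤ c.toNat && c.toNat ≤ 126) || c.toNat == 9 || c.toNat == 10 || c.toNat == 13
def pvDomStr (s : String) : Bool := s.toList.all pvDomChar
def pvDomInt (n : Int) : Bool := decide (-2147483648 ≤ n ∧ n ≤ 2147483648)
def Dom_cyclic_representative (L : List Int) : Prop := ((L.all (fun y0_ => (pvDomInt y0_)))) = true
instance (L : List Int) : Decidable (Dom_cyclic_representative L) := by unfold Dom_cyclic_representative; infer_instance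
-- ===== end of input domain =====

-- B replaces A's rotate-in-place-and-compare-every-rotation loop by candidate filtering:
-- only a rotation starting at the beginning of a run of the maximal element of L can be
-- the lexicographically maximal rotation, and B compares just those rotations, read off
-- a doubled list without mutating (objective: faster; measured faster in a timing run).
-- Equivalence is about the RETURN value: Python A mutates a list argument in place
-- (net effect: rotated right by one); B does not mutate its argument.

-- ===== PORT A =====
-- one body of A's loop: L.insert(n-1, L.pop(0))
def pyA_step (n : Nat) (l : List Int) : List Int :=
  match PySem.List.pop? l 0 with
  | some (h, t) => PySem.List.insert t ((n : Int) - 1) h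
  | none => l

def cyclic_representative (L : List Int) : List Int :=
  let n := L.length
  let st := (PySem.List.pyRange 0 ((n : Int) - 1) 1).foldl
      (fun (st : List Int × List Int) _ =>
        let l := pyA_step n st.1
        (l, if st.2 < l then l else st.2))
      (L, L)
  st.2

-- ===== PORT B =====
def cyclic_representative_alt (L : List Int) : List Int :=
  if L = [] then []
  else
    let n := L.length
    let m := (PySem.List.max? L (fun x => x)).getD 0
    let d := L ++ L
    let starts := (PySem.List.pyRange 0 (n : Int) 1).filter
        (fun i => PySem.List.pyGetD L i 0 == m && !(PySem.List.pyGetD L (i - 1) 0 == m))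
    let starts := if starts = [] then [(0 : Int)] else starts
    (PySem.List.max? (starts.map
        (fun i => PySem.List.slice d (some i) (some (i + (n : Int))))) (fun r => r)).getD []

-- ===== PRECONDITION & SPEC =====
def Spec_cyclic_representative (L : List Int) (out : List Int) : Prop := out = cyclic_representative_alt L
instance (L : List Int) (out : List Int) : Decidable (Spec_cyclic_representative L out) := by unfold Spec_cyclic_representative; infer_instance

-- ===== CLAIM (what is proved, stated in full; the proofs are below) =====
def Claim_equal_cyclic_representative : Prop := ∀ (L : List Int), Dom_cyclic_representative L → Spec_cyclic_representative L (cyclic_representative L)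

-- ===== LEMMAS AND PROOFS =====

-- index of the cyclic predecessor
def predIdx (n k : Nat) : Nat := if k = 0 then n - 1 else k - 1

def candIdx (L : List Int) (m : Int) : List Nat :=
  (List.range L.length).filter
    (fun k => (L.getD k 0 == m) && !(L.getD (predIdx L.length k) 0 == m))

theorem slice_double_rotate (L : List Int) (k : Nat) (hk : k ≤ L.length) :
    PySem.List.slice (L ++ L) (some (k : Int)) (some ((k : Int) + (L.length : Int)))
      = L.rotate k := by
  rw [PySem.List.slice_natCast_add, List.drop_append]
  have h0 : k - L.length = 0 := by omega
  rw [h0, List.drop_zero, List.take_append]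
  have h1 : (L.drop k).length = L.length - k := by simp
  rw [List.take_of_length_le (by omega), h1]
  have h2 : L.length - (L.length - k) = k := by omega
  rw [h2, List.rotate_eq_drop_append_take hk]

theorem B_eq (L : List Int) (hL : L ≠ []) (m : Int)
    (hmax : PySem.List.max? L (fun x => x) = some m) :
    cyclic_representative_alt L
      = (PySem.List.max?
          ((if candIdx L m = [] then [0] else candIdx L m).map (L.rotate ·))
          (fun r => r)).getD [] := by
  unfold cyclic_representative_alt
  rw [if_neg hL]
  simp only [hmax, Option.getD_some, PySem.List.pyRange_one, List.filter_map]
  have harg : ((L.length : Int) - 0).toNat = L.length := by omega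
  rw [harg]
  have hfil : (List.range L.length).filter
      ((fun i => PySem.List.pyGetD L i 0 == m && !(PySem.List.pyGetD L (i - 1) 0 == m)) ∘
        fun k : Nat => 0 + (k : Int))
      = candIdx L m := by
    unfold candIdx
    apply List.filter_congr
    intro k hk
    have hk' : k < L.length := List.mem_range.mp hk
    simp only [Function.comp_def, zero_add, PySem.List.pyGetD_natCast]
    congr 1
    cases k with
    | zero =>
      have h1 : PySem.List.pyGetD L (((0 : Nat) : Int) - 1) 0 = L.getLast hL := by
        simpa using PySem.List.pyGetD_neg_one L 0 hL
      have h2 : predIdx L.length 0 = L.length - 1 := by simp [predIdx]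
      rw [h1, h2, List.getLast_eq_getElem, List.getD_eq_getElem _ _ (by omega)]
    | succ j =>
      have hcast : ((j + 1 : Nat) : Int) - 1 = ((j : Nat) : Int) := by push_cast; ring
      rw [hcast, PySem.List.pyGetD_natCast]
      have h2 : predIdx L.length (j + 1) = j := by simp [predIdx]
      rw [h2]
  rw [hfil]
  by_cases hC : candIdx L m = []
  · rw [hC, if_pos rfl]
    simp only [List.map_nil, if_true]
    simp only [List.map_cons, List.map_nil, List.rotate_zero]
    have h0 : PySem.List.slice (L ++ L) (some (0 : Int)) (some ((0 : Int) + (L.length : Int)))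
        = L := by
      simp
    rw [h0]
  · rw [if_neg (by simpa using hC), if_neg hC, List.map_map]
    have hmap : (candIdx L m).map
        ((fun i => PySem.List.slice (L ++ L) (some i) (some (i + (L.length : Int)))) ∘
          fun k : Nat => 0 + (k : Int))
        = (candIdx L m).map (L.rotate ·) := by
      apply List.map_congr_left
      intro k hk
      unfold candIdx at hk
      have hk' : k < L.length := List.mem_range.mp (List.mem_filter.mp hk).1
      simp only [Function.comp_def, zero_add]
      exact slice_double_rotate L k hk'.le
    rw [hmap]

-- a list of elements ≤ m is ≤ m consed on its own dropLast
theorem le_cons_dropLast (m : Int) :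
    ∀ (w : List Int), (∀ y ∈ w, y ≤ m) → w ≤ m :: w.dropLast := by
  intro w
  induction w with
  | nil => intro _; exact le_of_lt List.Lex.nil
  | cons x w' ih =>
    intro h
    have hx : x ≤ m := h x List.mem_cons_self
    rcases lt_or_eq_of_le hx with hlt | heq
    · exact le_of_lt (List.Lex.rel hlt)
    · subst heq
      cases w' with
      | nil => simp
      | cons y w'' =>
        have h' : (y :: w'') ≤ x :: (y :: w'').dropLast :=
          ih (fun y hy => h y (List.mem_cons_of_mem _ hy))
        have hd : (x :: y :: w'').dropLast = x :: (y :: w'').dropLast := by simp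
        rw [hd]
        rcases lt_or_eq_of_le h' with h2 | h2
        · exact le_of_lt (List.Lex.cons h2)
        · rw [← h2]

theorem rotate_pred_eq (L : List Int) (i : Nat) (h1 : 1 ≤ i) (h2 : i ≤ L.length) :
    L.rotate (i - 1) = L[i - 1]'(by omega) :: (L.rotate i).dropLast := by
  have hL : L ≠ [] := by intro h; subst h; simp at h2; omega
  rw [List.rotate_eq_drop_append_take (by omega : i - 1 ≤ L.length),
      List.rotate_eq_drop_append_take h2]
  have htake : (L.take i) ≠ [] := by
    have hlen : (L.take i).length = i := by simp; omega
    intro hnil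
    rw [hnil] at hlen
    simp at hlen
    omega
  rw [List.dropLast_append_of_ne_nil htake]
  have hdl : (L.take i).dropLast = L.take (i - 1) := by
    rw [List.dropLast_eq_take, List.take_take, List.length_take]
    congr 1
    omega
  rw [hdl, List.drop_eq_getElem_cons (by omega : i - 1 < L.length)]
  have : i - 1 + 1 = i := by omega
  rw [this, List.cons_append]

theorem rotate_le_pred (L : List Int) (m : Int) (hmmax : ∀ y ∈ L, y ≤ m)
    (i : Nat) (h1 : 1 ≤ i) (h2 : i ≤ L.length) (hm : L[i - 1]'(by omega) = m) :
    L.rotate i ≤ L.rotate (i - 1) := by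
  rw [rotate_pred_eq L i h1 h2, hm]
  exact le_cons_dropLast m (L.rotate i)
    (fun y hy => hmmax y ((List.mem_rotate).mp hy))

-- the cyclic-predecessor step
theorem rotate_le_predIdx (L : List Int) (m : Int) (hmmax : ∀ y ∈ L, y ≤ m)
    (k : Nat) (hk : k < L.length)
    (hm : L[predIdx L.length k]'(by unfold predIdx; split <;> omega) = m) :
    L.rotate k ≤ L.rotate (predIdx L.length k) := by
  unfold predIdx at hm ⊢
  by_cases h0 : k = 0
  · subst h0
    simp only [reduceIte] at hm ⊢
    have := rotate_le_pred L m hmmax L.length (by omega) le_rfl (by simpa using hm)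
    simpa [List.rotate_length] using this
  · simp only [if_neg h0] at hm ⊢
    exact rotate_le_pred L m hmmax k (by omega) (by omega) hm

-- walking back from any maximal position reaches a run start
theorem walk (L : List Int) (m : Int) (hmmax : ∀ y ∈ L, y ≤ m)
    (f : Nat) (hf : f < L.length) (hfm : L.getD f 0 ≠ m) :
    ∀ (t k : Nat), k < L.length → L.getD k 0 = m →
      (if f ≤ k then k - f else k + L.length - f) ≤ t →
      ∃ s, s < L.length ∧ L.getD s 0 = m ∧
        L.getD (predIdx L.length s) 0 ≠ m ∧
        L.rotate k ≤ L.rotate s := by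
  intro t
  induction t with
  | zero =>
    intro k hk hkm hd
    exfalso
    have hkf : k ≠ f := fun h => hfm (h ▸ hkm)
    split at hd <;> omega
  | succ t ih =>
    intro k hk hkm hd
    have hpred_lt : predIdx L.length k < L.length := by unfold predIdx; split <;> omega
    by_cases hp : L.getD (predIdx L.length k) 0 = m
    · have hp' : L[predIdx L.length k]'(hpred_lt) = m := by
        rwa [List.getD_eq_getElem _ _ hpred_lt] at hp
      have hstep := rotate_le_predIdx L m hmmax k hk hp'
      have hkf : k ≠ f := fun h => hfm (h ▸ hkm)
      have hd' : (if f ≤ predIdx L.length k then predIdx L.length k - f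
          else predIdx L.length k + L.length - f) ≤ t := by
        have hpf : predIdx L.length k ≠ f := fun h => hfm (h ▸ hp)
        unfold predIdx at hpf ⊢
        split at hd <;> split at hpf <;> split <;> (try split) <;> omega
      obtain ⟨s, hs1, hs2, hs3, hs4⟩ := ih (predIdx L.length k) hpred_lt hp hd'
      exact ⟨s, hs1, hs2, hs3, le_trans hstep hs4⟩
    · exact ⟨k, hk, hkm, hp, le_refl _⟩

theorem ite_lt_eq_max (M r : List Int) : (if M < r then r else M) = max M r := by
  rcases lt_trichotomy M r with h|h|h <;> simp [le_of_lt, h]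

theorem pyA_step_rotate (L : List Int) (hL : L ≠ []) (k : Nat) :
    pyA_step L.length (L.rotate k) = L.rotate (k + 1) := by
  have hne : L.rotate k ≠ [] := by
    simpa using hL
  obtain ⟨a, s, hs⟩ := List.exists_cons_of_ne_nil hne
  have hlen : s.length + 1 = L.length := by
    have := L.length_rotate k
    rw [hs] at this; simpa using this
  have hcast : ((L.length : Int) - 1) = PySem.List.len s := by
    simp [PySem.List.len]; omega
  have h1 : pyA_step L.length (L.rotate k) = s ++ [a] := by
    rw [hs]
    simp only [pyA_step, PySem.List.pop?_zero_cons, hcast]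
    rw [show PySem.List.len s = ((s.length : Nat) : Int) from by simp [PySem.List.len],
        PySem.List.insert_natCast s s.length a le_rfl]
    simp
  rw [h1]
  have : L.rotate (k + 1) = (L.rotate k).rotate 1 := by
    rw [List.rotate_rotate]
  rw [this, hs]
  simp [List.rotate_cons_succ]

theorem foldA (L : List Int) (hL : L ≠ []) (c : Nat) : ∀ (k : Nat) (M : List Int),
    (List.range c).foldl
      (fun (st : List Int × List Int) _ =>
        let l := pyA_step L.length st.1
        (l, if st.2 < l then l else st.2))
      (L.rotate k, M)
    = (L.rotate (k + c),
       ((List.range c).map (fun j => L.rotate (k + 1 + j))).foldl max M) := by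
  induction c with
  | zero => simp
  | succ c ih =>
    intro k M
    rw [List.range_succ_eq_map, List.foldl_cons]
    simp only [List.map_cons, List.map_map]
    rw [List.foldl_cons]
    have hstep := pyA_step_rotate L hL k
    simp only [hstep]
    rw [List.foldl_map, ih (k+1) (if M < L.rotate (k+1) then L.rotate (k+1) else M)]
    rw [ite_lt_eq_max]
    simp only [Function.comp_def, Nat.succ_eq_add_one, Nat.add_zero]
    have h1 : k + 1 + c = k + (c + 1) := by omega
    have h2 : (fun j => L.rotate (k + 1 + 1 + j)) = (fun j => L.rotate (k + 1 + (j + 1))) := by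
      funext j; congr 1; omega
    rw [h1, h2]

theorem A_eq_foldmax (L : List Int) (hL : L ≠ []) :
    cyclic_representative L
      = ((List.range (L.length - 1)).map (fun j => L.rotate (j + 1))).foldl max L := by
  unfold cyclic_representative
  simp only [PySem.List.pyRange_one, List.foldl_map]
  have hn : ((L.length : Int) - 1 - 0).toNat = L.length - 1 := by omega
  rw [hn]
  have h0 : (L, L) = (L.rotate 0, L) := by simp
  rw [h0, foldA L hL (L.length - 1) 0 L]
  simp only [Nat.zero_add]
  rw [List.foldl_map]
  congr 1
  funext x y
  rw [Nat.add_comm]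

theorem rotate_eq_cons (L : List Int) (i : Nat) (hi : i < L.length) :
    L.rotate i = L[i] :: (L.drop (i + 1) ++ L.take i) := by
  conv_lhs => rw [List.rotate_eq_drop_append_take hi.le, List.drop_eq_getElem_cons hi]
  rw [List.cons_append]

theorem max?_inst_congr (xs : List (List Int)) :
    @PySem.List.max? (List ℤ) (List ℤ) List.instLT (fun a b => a.decidableLT b) xs (fun r => r)
    = @PySem.List.max? (List ℤ) (List ℤ) List.instLinearOrder.toLT LinearOrder.toDecidableLT xs (fun r => r) := by
  congr 1


theorem A_eq_B (L : List Int) : cyclic_representative L = cyclic_representative_alt L := by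
  by_cases hL : L = []
  · subst hL; rfl
  cases hmax : PySem.List.max? L (fun x => x) with
  | none => exact absurd ((PySem.List.max?_eq_none_iff _ _).mp hmax) hL
  | some m =>
  have hmmem : m ∈ L := PySem.List.max?_mem hmax
  have hmmax : ∀ y ∈ L, y ≤ m := fun y hy => by simpa using PySem.List.max?_isMax hmax y hy
  have hn : 0 < L.length := List.length_pos_iff.mpr hL
  set Aval := ((List.range (L.length - 1)).map (fun j => L.rotate (j + 1))).foldl max L with hAval
  have hb : ∀ i, i < L.length → L.rotate i ≤ Aval := by
    intro i hi
    cases i with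
    | zero => simpa using (PySem.List.le_foldl_max _ L).1
    | succ j =>
      apply (PySem.List.le_foldl_max _ L).2
      exact List.mem_map.mpr ⟨j, List.mem_range.mpr (by omega), rfl⟩
  have ha : ∃ i, i < L.length ∧ Aval = L.rotate i := by
    rcases PySem.List.foldl_max_mem ((List.range (L.length - 1)).map (fun j => L.rotate (j + 1))) L with h | h
    · exact ⟨0, hn, by simpa using h⟩
    · rcases List.mem_map.mp h with ⟨j, hj, hrot⟩
      exact ⟨j + 1, by have := List.mem_range.mp hj; omega, hrot.symm⟩
  rw [A_eq_foldmax L hL, B_eq L hL m hmax, ← hAval]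
  by_cases hall : ∀ k, k < L.length → L.getD k 0 = m
  · -- every element is the maximum: no run start, candidate index 0
    have hC : candIdx L m = [] := by
      unfold candIdx
      apply List.filter_eq_nil_iff.mpr
      intro k hk
      have hk' : k < L.length := List.mem_range.mp hk
      have hpl : predIdx L.length k < L.length := by unfold predIdx; split <;> omega
      have e1 := hall _ hk'
      have e2 := hall _ hpl
      simp only [e1, e2, beq_self_eq_true, Bool.not_true, Bool.and_false]
      simp
    rw [hC, if_pos rfl]
    simp only [List.map_cons, List.map_nil, List.rotate_zero]
    have hmx : PySem.List.max? [L] (fun r => r) = some L := rfl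
    rw [hmx, Option.getD_some]
    have hrep : ∀ i : Nat, L.rotate i = L := by
      have hLrep : L = List.replicate L.length m := by
        rw [List.eq_replicate_iff]
        refine ⟨rfl, ?_⟩
        intro b hb'
        rcases List.mem_iff_getElem.mp hb' with ⟨k, hk, hbk⟩
        have := hall k hk
        rw [List.getD_eq_getElem _ _ hk] at this
        rw [← hbk, this]
      intro i
      conv_lhs => rw [hLrep]
      rw [List.rotate_replicate, ← hLrep]
    rw [hAval]
    rcases PySem.List.foldl_max_mem ((List.range (L.length - 1)).map (fun j => L.rotate (j + 1))) L with h | h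
    · exact h
    · rcases List.mem_map.mp h with ⟨j, _, hrot⟩
      rw [← hrot, hrep]
  · push Not at hall
    obtain ⟨f, hf, hfne⟩ := hall
    have hwalk : ∀ k, k < L.length → L.getD k 0 = m →
        ∃ s, s < L.length ∧ L.getD s 0 = m ∧
          L.getD (predIdx L.length s) 0 ≠ m ∧ L.rotate k ≤ L.rotate s :=
      fun k hk hkm => walk L m hmmax f hf hfne L.length k hk hkm (by split <;> omega)
    have hmemC : ∀ s, s < L.length → L.getD s 0 = m →
        L.getD (predIdx L.length s) 0 ≠ m → s ∈ candIdx L m := by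
      intro s hs h1 h2
      unfold candIdx
      refine List.mem_filter.mpr ⟨List.mem_range.mpr hs, ?_⟩
      simp only [h1, beq_self_eq_true, Bool.true_and, Bool.not_eq_true']
      simp only [beq_eq_false_iff_ne, ne_eq]
      exact h2
    obtain ⟨k0, hk0, hLk0⟩ := List.mem_iff_getElem.mp hmmem
    have hk0D : L.getD k0 0 = m := by rw [List.getD_eq_getElem _ _ hk0, hLk0]
    obtain ⟨s0, hs0, hs0m, hs0p, _⟩ := hwalk k0 hk0 hk0D
    have hs0C : s0 ∈ candIdx L m := hmemC s0 hs0 hs0m hs0p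
    have hCne : candIdx L m ≠ [] := fun h => by simp [h] at hs0C
    rw [if_neg hCne]
    cases hmc : PySem.List.max? ((candIdx L m).map (L.rotate ·)) (fun r => r) with
    | none =>
      exact absurd ((PySem.List.max?_eq_none_iff _ _).mp hmc)
        (by simpa using hCne)
    | some Mc =>
    have hmc' := hmc
    rw [max?_inst_congr] at hmc'
    have hMcmem : Mc ∈ (candIdx L m).map (L.rotate ·) := PySem.List.max?_mem hmc
    have hMcmax : ∀ y ∈ (candIdx L m).map (L.rotate ·), y ≤ Mc :=
      fun y hy => by simpa using PySem.List.max?_isMax hmc' y hy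
    have hCin : ∀ k, k ∈ candIdx L m → k < L.length := by
      intro k hk
      unfold candIdx at hk
      exact List.mem_range.mp (List.mem_filter.mp hk).1
    have h1 : Mc ≤ Aval := by
      rcases List.mem_map.mp hMcmem with ⟨k, hkC, hrot⟩
      rw [← hrot]
      exact hb k (hCin k hkC)
    have h2 : Aval ≤ Mc := by
      obtain ⟨i, hi, hAi⟩ := ha
      rw [hAi]
      by_cases him : L.getD i 0 = m
      · obtain ⟨s, hs, hsm, hsp, hle⟩ := hwalk i hi him
        exact le_trans hle (hMcmax _ (List.mem_map.mpr ⟨s, hmemC s hs hsm hsp, rfl⟩))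
      · have hlt : L[i] < m := by
          rw [List.getD_eq_getElem _ _ hi] at him
          exact lt_of_le_of_ne (hmmax _ (List.getElem_mem hi)) him
        have hs0m' : L[s0]'hs0 = m := by rwa [List.getD_eq_getElem _ _ hs0] at hs0m
        have hik : L.rotate i < L.rotate s0 := by
          rw [rotate_eq_cons L i hi, rotate_eq_cons L s0 hs0, hs0m']
          exact List.Lex.rel hlt
        exact le_of_lt (lt_of_lt_of_le hik
          (hMcmax _ (List.mem_map.mpr ⟨s0, hs0C, rfl⟩)))
    simp only [Option.getD_some]
    exact le_antisymm h2 h1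

-- ===== VERDICT (by name: the statement is the Claim_ definition above) =====
theorem cyclic_representative_spec : Claim_equal_cyclic_representative := by
  intro L _
  unfold Spec_cyclic_representative
  exact A_eq_B L
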